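-- pv_equiv track=rewrite | github.com/furlanut/lottery-lab | backend/lotto_predictor/analyzer/filters/ritardo.py | _calcola_ritardo
-- ===== SOURCE A (Python) =====
-- def _calcola_ritardo(
--     dati: list[tuple[str, dict[str, list[int]]]],
--     indice_estrazione: int,
--     ruota: str,
--     num_a: int,
--     num_b: int,
-- ) -> int:
--     """Calcola quante estrazioni sono passate dall'ultima uscita della coppia.
--
--     Cerca a ritroso dalla estrazione corrente (esclusa) se entrambi
--     i numeri compaiono tra i 5 estratti della ruota.
--     """
--     delay = 0
--     for idx in range(indice_estrazione - 1, -1, -1):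
--         _, estratti = dati[idx]
--         if ruota not in estratti:
--             delay += 1
--             continue
--
--         numeri = set(estratti[ruota])
--         if num_a in numeri and num_b in numeri:
--             return delay
--
--         delay += 1
--
--     # Mai uscita: ritardo massimo
--     return delay
-- ===== SOURCE B (Python) =====
-- def _calcola_ritardo(
--     dati: list[tuple[str, dict[str, list[int]]]],
--     indice_estrazione: int,
--     ruota: str,
--     num_a: int,
--     num_b: int,
-- ) -> int:
--     """Forward scan: collect every past index where the pair appeared on the
--     wheel, then compute the delay from the most recent one in closed form."""
--     n = max(0, indice_estrazione)
--     matches = [idx for idx in range(n)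
--                if ruota in dati[idx][1]
--                and num_a in dati[idx][1][ruota]
--                and num_b in dati[idx][1][ruota]]
--     if matches:
--         return indice_estrazione - 1 - matches[-1]
--     return n
-- ===== Notes on version B (the rewrite author's own statement) =====
-- stated objective: alternative
-- what changed: Replaced the backward early-return scan with a running delay counter by a forward comprehension collecting all matching indices plus a closed-form result (indice_estrazione - 1 - last match, or max(0, indice_estrazione) if none).
import Mathlib
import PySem

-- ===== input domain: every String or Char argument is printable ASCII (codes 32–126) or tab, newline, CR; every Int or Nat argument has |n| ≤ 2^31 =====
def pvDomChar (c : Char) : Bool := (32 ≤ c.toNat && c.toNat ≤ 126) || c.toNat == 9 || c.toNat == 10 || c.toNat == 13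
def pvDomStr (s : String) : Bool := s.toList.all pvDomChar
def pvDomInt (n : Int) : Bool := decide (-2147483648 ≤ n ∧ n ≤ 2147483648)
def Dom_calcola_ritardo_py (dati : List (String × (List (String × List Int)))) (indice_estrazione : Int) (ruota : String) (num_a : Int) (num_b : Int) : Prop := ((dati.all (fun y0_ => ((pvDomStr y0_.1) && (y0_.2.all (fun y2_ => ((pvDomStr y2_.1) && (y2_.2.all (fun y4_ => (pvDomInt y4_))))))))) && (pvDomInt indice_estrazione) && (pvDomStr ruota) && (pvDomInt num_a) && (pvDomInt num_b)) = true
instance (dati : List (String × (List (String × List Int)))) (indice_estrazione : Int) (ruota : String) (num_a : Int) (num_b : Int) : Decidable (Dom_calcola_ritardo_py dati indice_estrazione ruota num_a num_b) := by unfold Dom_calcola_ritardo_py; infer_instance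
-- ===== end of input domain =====

-- B replaces A's backward early-return scan with a running counter by a forward
-- collection of all matching indices plus a closed-form arithmetic result
-- (objective: alternative decomposition, same O(n) cost).

-- ===== PORT A =====
-- backward loop: for idx in range(indice_estrazione-1, -1, -1), carrying delay
def pvA_loop (dati : List (String × (List (String × List Int)))) (ruota : String) (num_a num_b : Int) : List Int → Int → Int
  | [], delay => delay
  | idx :: rest, delay =>
    match PySem.List.pyGet? dati idx with
    | none => 0  -- dati[idx] IndexError in Python; unreachable under Pre_
    | some row =>
      match row.2.lookup ruota with
      | none => pvA_loop dati ruota num_a num_b rest (delay + 1)   -- ruota not in estratti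
      | some vals =>
        let numeri := PySem.Set.ofList vals                        -- set(estratti[ruota])
        if numeri.contains num_a && numeri.contains num_b then delay
        else pvA_loop dati ruota num_a num_b rest (delay + 1)

def calcola_ritardo_py (dati : List (String × (List (String × List Int)))) (indice_estrazione : Int) (ruota : String) (num_a : Int) (num_b : Int) : Int :=
  pvA_loop dati ruota num_a num_b (PySem.List.pyRange (indice_estrazione - 1) (-1) (-1)) 0

-- ===== PORT B =====
-- the comprehension's condition: ruota in dati[idx][1] and both numbers in dati[idx][1][ruota]
def pvB_hit (dati : List (String × (List (String × List Int)))) (ruota : String) (num_a num_b : Int) (idx : Int) : Bool :=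
  match PySem.List.pyGet? dati idx with
  | none => false  -- dati[idx] IndexError in Python; unreachable under Pre_
  | some row =>
    match row.2.lookup ruota with
    | none => false
    | some ns => ns.contains num_a && ns.contains num_b

def calcola_ritardo_py_alt (dati : List (String × (List (String × List Int)))) (indice_estrazione : Int) (ruota : String) (num_a : Int) (num_b : Int) : Int :=
  -- matches = [idx for idx in range(max(0, indice_estrazione)) if <hit>]; n = max(0, indice_estrazione)
  match ((PySem.List.pyRange 0 (max 0 indice_estrazione) 1).filter (pvB_hit dati ruota num_a num_b)).getLast? with
  | some m => indice_estrazione - 1 - m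
  | none => max 0 indice_estrazione

-- ===== PRECONDITION & SPEC =====
-- Pre_ excludes exactly the inputs where A raises IndexError: indice_estrazione
-- exceeding len(dati) makes dati[idx] fail on the first iteration.
def Pre_calcola_ritardo_py (dati : List (String × (List (String × List Int)))) (indice_estrazione : Int) (ruota : String) (num_a : Int) (num_b : Int) : Prop :=
  indice_estrazione ≤ (dati.length : Int)
instance (dati : List (String × (List (String × List Int)))) (indice_estrazione : Int) (ruota : String) (num_a : Int) (num_b : Int) : Decidable (Pre_calcola_ritardo_py dati indice_estrazione ruota num_a num_b) := by unfold Pre_calcola_ritardo_py; infer_instance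

def pvWitness_calcola_ritardo_py : (List (String × (List (String × List Int)))) × Int × String × Int × Int :=
  ([("d1", [("FI", [1, 2, 3, 4, 5])]), ("d2", [("FI", [2, 7, 8, 9, 10])])], 2, "FI", 1, 2)

def Spec_calcola_ritardo_py (dati : List (String × (List (String × List Int)))) (indice_estrazione : Int) (ruota : String) (num_a : Int) (num_b : Int) (out : Int) : Prop := out = calcola_ritardo_py_alt dati indice_estrazione ruota num_a num_b
instance (dati : List (String × (List (String × List Int)))) (indice_estrazione : Int) (ruota : String) (num_a : Int) (num_b : Int) (out : Int) : Decidable (Spec_calcola_ritardo_py dati indice_estrazione ruota num_a num_b out) := by unfold Spec_calcola_ritardo_py; infer_instance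

-- ===== CLAIM (what is proved, stated in full; the proofs are below) =====
def Claim_equal_calcola_ritardo_py : Prop := ∀ (dati : List (String × (List (String × List Int)))) (indice_estrazione : Int) (ruota : String) (num_a : Int) (num_b : Int), Dom_calcola_ritardo_py dati indice_estrazione ruota num_a num_b → Pre_calcola_ritardo_py dati indice_estrazione ruota num_a num_b → Spec_calcola_ritardo_py dati indice_estrazione ruota num_a num_b (calcola_ritardo_py dati indice_estrazione ruota num_a num_b)

-- ===== LEMMAS AND PROOFS =====

-- main invariant: the backward counting loop from index k-1 equals the
-- closed-form expression over the forward match list on [0, k)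
theorem pvA_loop_eq (dati : List (String × (List (String × List Int)))) (ruota : String) (num_a num_b : Int) (k : Nat) (hk : k ≤ dati.length) (delay : Int) :
    pvA_loop dati ruota num_a num_b (PySem.List.pyRange ((k : Int) - 1) (-1) (-1)) delay =
      (match ((PySem.List.pyRange 0 (k : Int) 1).filter (pvB_hit dati ruota num_a num_b)).getLast? with
       | some m => delay + ((k : Int) - 1 - m)
       | none => delay + (k : Int)) := by
  induction k generalizing delay with
  | zero =>
    rw [PySem.List.pyRange_neg_one_eq_nil (by omega), PySem.List.pyRange_one_eq_nil (by omega)]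
    simp [pvA_loop]
  | succ k ih =>
    have hlt : k < dati.length := by omega
    have hcons : PySem.List.pyRange (((k + 1 : Nat) : Int) - 1) (-1) (-1)
        = (k : Int) :: PySem.List.pyRange ((k : Int) - 1) (-1) (-1) := by
      have := PySem.List.pyRange_neg_one_cons (a := (k : Int)) (b := -1) (by omega)
      push_cast
      simpa using this
    have hsucc : PySem.List.pyRange 0 ((k + 1 : Nat) : Int) 1
        = PySem.List.pyRange 0 (k : Int) 1 ++ [(k : Int)] := by
      have := PySem.List.pyRange_one_succ_right (a := 0) (b := (k : Int)) (by omega)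
      push_cast
      simpa using this
    have hget : PySem.List.pyGet? dati ((k : Int)) = some dati[k] :=
      PySem.List.pyGet?_ofNat (h := hlt)
    rw [hcons, hsucc, List.filter_append]
    by_cases hhit : pvB_hit dati ruota num_a num_b (k : Int) = true
    · -- pair found at index k: A returns delay, B's last match is k
      have hfil : List.filter (pvB_hit dati ruota num_a num_b) [(k : Int)] = [(k : Int)] := by
        simp [hhit]
      rw [hfil]
      simp only [pvA_loop, hget]
      cases hl : (dati[k]).2.lookup ruota with
      | none => exfalso; simp [pvB_hit, hget, hl] at hhit
      | some vals =>
        have hmem : ((PySem.Set.ofList vals).contains num_a && (PySem.Set.ofList vals).contains num_b) = true := by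
          simp only [pvB_hit, hget, hl] at hhit
          simpa [PySem.Set.contains_eq_listContains] using hhit
        simp only [hmem, if_true, List.getLast?_concat]
        push_cast
        ring
    · -- no match at k: A recurses with delay+1, B's match list is unchanged
      have hfil : List.filter (pvB_hit dati ruota num_a num_b) [(k : Int)] = [] := by
        simp [Bool.not_eq_true] at hhit
        simp [hhit]
      rw [hfil, List.append_nil]
      have hrec : pvA_loop dati ruota num_a num_b ((k : Int) :: PySem.List.pyRange ((k : Int) - 1) (-1) (-1)) delay
          = pvA_loop dati ruota num_a num_b (PySem.List.pyRange ((k : Int) - 1) (-1) (-1)) (delay + 1) := by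
        simp only [pvA_loop, hget]
        cases hl : (dati[k]).2.lookup ruota with
        | none => simp
        | some vals =>
          have hmem : ((PySem.Set.ofList vals).contains num_a && (PySem.Set.ofList vals).contains num_b) = false := by
            simp only [pvB_hit, hget, hl] at hhit
            simpa [PySem.Set.contains_eq_listContains] using hhit
          simp only [hmem, Bool.false_eq_true, if_false]
      rw [hrec, ih (by omega) (delay + 1)]
      cases hlast : ((PySem.List.pyRange 0 (k : Int) 1).filter (pvB_hit dati ruota num_a num_b)).getLast? with
      | none => push_cast; ring
      | some m => push_cast; ring

-- ===== VERDICT (by name: the statement is the Claim_ definition above) =====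
theorem calcola_ritardo_py_spec : Claim_equal_calcola_ritardo_py := by
  intro dati ie ruota num_a num_b _hdom hpre
  unfold Pre_calcola_ritardo_py at hpre
  unfold Spec_calcola_ritardo_py calcola_ritardo_py calcola_ritardo_py_alt
  by_cases hle : ie ≤ 0
  case pos =>
    rw [PySem.List.pyRange_neg_one_eq_nil (by omega), max_eq_left hle,
       PySem.List.pyRange_one_eq_nil (le_refl 0)]
    simp [pvA_loop]
  case neg =>
    obtain ⟨k, rfl⟩ : ∃ k : Nat, ie = (k : Int) := ⟨ie.toNat, by omega⟩
    rw [max_eq_right (Int.natCast_nonneg k),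
       pvA_loop_eq dati ruota num_a num_b k (by exact_mod_cast hpre) 0]
    cases hlast : ((PySem.List.pyRange 0 (k : Int) 1).filter (pvB_hit dati ruota num_a num_b)).getLast? with
    | none => ring
    | some m => ring
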